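-- pv_equiv track=rewrite | github.com/Damilare-05/BeadPatternGeneration | BeadPatternGeneraton.py | generate_linear_pattern
-- ===== SOURCE A (Python) =====
-- def generate_linear_pattern(palette, pattern_length=12, mode="symmetric"):
--     colors = [tuple(color) for color in palette]
--     if mode == "symmetric":
--         half = pattern_length // 2
--         pattern = [colors[i % len(colors)] for i in range(half)]
--         return pattern + pattern[::-1]
--     elif mode == "alternating":
--         pattern, forward, i = [], True, 0
--         while len(pattern) < pattern_length:
--             pattern.append(colors[i % len(colors)])
--             i += 1 if forward else -1
--             if i == len(colors) or i < 0:
--                 forward = not forward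
--                 i = max(min(i, len(colors)-1), 0)
--         return pattern
--     elif mode == "gradient":
--         return [colors[i % len(colors)] for i in range(pattern_length)]
--     elif mode == "zigzag":
--         pattern, reverse = [], False
--         while len(pattern) < pattern_length:
--             seq = colors[::-1] if reverse else colors
--             for color in seq:
--                 if len(pattern) >= pattern_length:
--                     break
--                 pattern.append(color)
--             reverse = not reverse
--         return pattern
--     elif mode == "burst":
--         half = pattern_length // 2
--         half_pattern = [colors[i % len(colors)] for i in range(half)]
--         pattern = half_pattern[::-1] + half_pattern
--         if pattern_length % 2 != 0:
--             pattern.insert(half, colors[half % len(colors)])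
--         return pattern
--     return []
-- ===== SOURCE B (Python) =====
-- def _tile(colors, k):
--     """First k beads of the palette repeated cyclically (empty for k <= 0)."""
--     if k <= 0:
--         return []
--     reps = -(-k // len(colors))  # ceil(k / len(colors)); raises ZeroDivisionError on an empty palette, like A
--     return (colors * reps)[:k]
--
--
-- def generate_linear_pattern(palette, pattern_length=12, mode="symmetric"):
--     colors = [tuple(color) for color in palette]
--     if mode == "symmetric":
--         half = _tile(colors, pattern_length // 2)
--         return half + half[::-1]
--     if mode in ("alternating", "zigzag"):
--         # both modes are one period unit (forward then backward) tiled to length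
--         return _tile(colors + colors[::-1], pattern_length)
--     if mode == "gradient":
--         return _tile(colors, pattern_length)
--     if mode == "burst":
--         h = pattern_length // 2
--         half = _tile(colors, h)
--         if pattern_length % 2 != 0:
--             return half[::-1] + [colors[h % len(colors)]] + half
--         return half[::-1] + half
--     return []
-- ===== Notes on version B (the rewrite author's own statement) =====
-- stated objective: simpler
-- what changed: Replaces A's bouncing-index state machine (alternating) and nested while/for with break (zigzag) by one shared tile step: build the period unit colors + colors[::-1], repeat it by list multiplication and truncate; the modulo comprehensions of symmetric/gradient/burst likewise become tiling, and the burst center insert becomes a plain concatenation.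
import Mathlib
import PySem

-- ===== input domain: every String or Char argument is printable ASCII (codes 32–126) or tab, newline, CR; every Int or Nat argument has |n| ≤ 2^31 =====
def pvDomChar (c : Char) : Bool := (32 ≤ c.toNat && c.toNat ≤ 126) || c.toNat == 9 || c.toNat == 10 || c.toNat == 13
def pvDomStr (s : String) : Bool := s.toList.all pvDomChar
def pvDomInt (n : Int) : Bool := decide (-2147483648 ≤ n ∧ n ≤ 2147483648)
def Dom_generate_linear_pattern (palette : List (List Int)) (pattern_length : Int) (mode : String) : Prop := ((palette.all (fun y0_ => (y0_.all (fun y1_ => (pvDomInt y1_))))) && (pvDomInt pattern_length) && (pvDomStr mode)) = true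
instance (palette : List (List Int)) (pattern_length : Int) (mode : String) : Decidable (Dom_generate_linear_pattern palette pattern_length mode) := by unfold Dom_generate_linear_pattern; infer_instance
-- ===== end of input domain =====

-- B replaces A's bouncing-index state machine (alternating) and nested while/for (zigzag) by one
-- tiled period unit colors ++ colors[::-1] truncated to length, and A's per-index modulo
-- comprehensions by list-multiplication-and-slice tiling; objective: simpler. Return value only.

-- ===== PORT A =====
-- colors[i % len(colors)]; the .getD [] is unreachable on Pre_ (len(colors) = 0 is excluded
-- wherever this is evaluated, since Python raises ZeroDivisionError there)
def cyIdx (colors : List (List Int)) (i : Int) : List Int :=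
  (PySem.List.pyGet? colors (PySem.Int.mod i (colors.length : Int))).getD []

-- the 'alternating' while-loop; state (pattern, forward, i); fuel = pattern_length.toNat is
-- exact wherever Python terminates (one append per iteration)
def altLoop (colors : List (List Int)) (n : Int) :
    Nat → List (List Int) → Bool → Int → List (List Int)
  | 0, pat, _, _ => pat
  | fuel+1, pat, forward, i =>
    if (pat.length : Int) < n then
      let pat' := pat ++ [cyIdx colors i]
      let i' := i + (if forward then 1 else -1)
      if i' = (colors.length : Int) ∨ i' < 0 then
        altLoop colors n fuel pat' (!forward) (max (min i' ((colors.length : Int) - 1)) 0)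
      else
        altLoop colors n fuel pat' forward i'
    else pat

-- the inner 'for color in seq' of zigzag, with its break on len(pattern) >= pattern_length
def zigInner (n : Int) : List (List Int) → List (List Int) → List (List Int)
  | [], pat => pat
  | c :: rest, pat => if n ≤ (pat.length : Int) then pat else zigInner n rest (pat ++ [c])

-- the outer 'while' of zigzag; fuel = pattern_length.toNat is exact wherever Python terminates
-- (each entered iteration appends at least one element when colors ≠ []; Python loops forever
-- on an empty palette, which Pre_ excludes)
def zigLoop (colors : List (List Int)) (n : Int) :
    Nat → List (List Int) → Bool → List (List Int)
  | 0, pat, _ => pat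
  | fuel+1, pat, rev =>
    if (pat.length : Int) < n then
      zigLoop colors n fuel (zigInner n (if rev then colors.reverse else colors) pat) (!rev)
    else pat

-- tuple(color) is the identity on the List Int representation, so colors = palette
def generate_linear_pattern (palette : List (List Int)) (pattern_length : Int) (mode : String) : List (List Int) :=
  let colors := palette
  if mode = "symmetric" then
    let half := PySem.Int.floordiv pattern_length 2
    let pattern := (PySem.List.pyRange 0 half 1).map (fun i => cyIdx colors i)
    pattern ++ pattern.reverse
  else if mode = "alternating" then
    altLoop colors pattern_length pattern_length.toNat [] true 0
  else if mode = "gradient" then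
    (PySem.List.pyRange 0 pattern_length 1).map (fun i => cyIdx colors i)
  else if mode = "zigzag" then
    zigLoop colors pattern_length pattern_length.toNat [] false
  else if mode = "burst" then
    let half := PySem.Int.floordiv pattern_length 2
    let half_pattern := (PySem.List.pyRange 0 half 1).map (fun i => cyIdx colors i)
    let pattern := half_pattern.reverse ++ half_pattern
    if PySem.Int.mod pattern_length 2 ≠ 0 then
      PySem.List.insert pattern half (cyIdx colors half)
    else pattern
  else []

-- ===== PORT B =====
-- B's _tile: first k beads of colors repeated cyclically; (colors * reps)[:k] with
-- reps = ceil(k/len) written as -(-k // len)  (the junk value of floordiv at len = 0 is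
-- unreachable on Pre_, where Python's _tile raises ZeroDivisionError)
def tileB (colors : List (List Int)) (k : Int) : List (List Int) :=
  if k ≤ 0 then []
  else
    let reps := -(PySem.Int.floordiv (-k) (colors.length : Int))
    PySem.List.slice (PySem.List.pyRepeat colors reps) none (some k)

def generate_linear_pattern_alt (palette : List (List Int)) (pattern_length : Int) (mode : String) : List (List Int) :=
  let colors := palette
  if mode = "symmetric" then
    let half := tileB colors (PySem.Int.floordiv pattern_length 2)
    half ++ half.reverse
  else if mode = "alternating" ∨ mode = "zigzag" then
    tileB (colors ++ colors.reverse) pattern_length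
  else if mode = "gradient" then
    tileB colors pattern_length
  else if mode = "burst" then
    let h := PySem.Int.floordiv pattern_length 2
    let half := tileB colors h
    if PySem.Int.mod pattern_length 2 ≠ 0 then half.reverse ++ [cyIdx colors h] ++ half
    else half.reverse ++ half
  else []

-- ===== PRECONDITION & SPEC =====
-- Pre_ excludes exactly the inputs where the Python A does not return: with an empty palette,
-- any mode/length combination that reaches colors[...] raises ZeroDivisionError, and zigzag
-- with positive length loops forever; no input on which A returns a value is excluded.
def Pre_generate_linear_pattern (palette : List (List Int)) (pattern_length : Int) (mode : String) : Prop :=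
  palette ≠ [] ∨
    (if mode = "symmetric" then pattern_length ≤ 1
     else if mode = "alternating" ∨ mode = "gradient" ∨ mode = "zigzag" then pattern_length ≤ 0
     else if mode = "burst" then pattern_length ≤ 0 ∧ PySem.Int.mod pattern_length 2 = 0
     else True)
instance (palette : List (List Int)) (pattern_length : Int) (mode : String) : Decidable (Pre_generate_linear_pattern palette pattern_length mode) := by unfold Pre_generate_linear_pattern; infer_instance

def pvWitness_generate_linear_pattern : List (List Int) × Int × String := ([[1, 0], [2, 5], [3, 3]], 8, "alternating")

def Spec_generate_linear_pattern (palette : List (List Int)) (pattern_length : Int) (mode : String) (out : List (List Int)) : Prop := out = generate_linear_pattern_alt palette pattern_length mode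
instance (palette : List (List Int)) (pattern_length : Int) (mode : String) (out : List (List Int)) : Decidable (Spec_generate_linear_pattern palette pattern_length mode out) := by unfold Spec_generate_linear_pattern; infer_instance

-- ===== CLAIM (what is proved, stated in full; the proofs are below) =====
def Claim_equal_generate_linear_pattern : Prop := ∀ (palette : List (List Int)) (pattern_length : Int) (mode : String), Dom_generate_linear_pattern palette pattern_length mode → Pre_generate_linear_pattern palette pattern_length mode → Spec_generate_linear_pattern palette pattern_length mode (generate_linear_pattern palette pattern_length mode)

-- ===== LEMMAS AND PROOFS =====

-- the common value both programs compute: the first k beads of the cyclic repetition of colors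
def cyc (colors : List (List Int)) (k : Nat) : List (List Int) :=
  (List.range k).map (fun j => colors.getD (j % colors.length) [])

theorem cyc_zero (colors : List (List Int)) : cyc colors 0 = [] := rfl

theorem cyc_succ (colors : List (List Int)) (k : Nat) :
    cyc colors (k + 1) = cyc colors k ++ [colors.getD (k % colors.length) []] := by
  simp [cyc, List.range_succ]

theorem length_cyc (colors : List (List Int)) (k : Nat) : (cyc colors k).length = k := by
  simp [cyc]

theorem cyIdx_natCast (colors : List (List Int)) (hc : colors ≠ []) (j : Nat) :
    cyIdx colors (j : Int) = colors.getD (j % colors.length) [] := by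
  have hL : 0 < colors.length := List.length_pos_iff.mpr hc
  have hlt : j % colors.length < colors.length := Nat.mod_lt _ hL
  rw [cyIdx, PySem.Int.mod_natCast, PySem.List.pyGet?_natCast,
    List.getElem?_eq_getElem hlt, Option.getD_some, List.getD_eq_getElem _ _ hlt]

-- A's modulo comprehension [colors[i % len] for i in range(h)] is cyc
theorem map_range_cyIdx (colors : List (List Int)) (hc : colors ≠ []) (h : Int) :
    (PySem.List.pyRange 0 h 1).map (fun i => cyIdx colors i) = cyc colors h.toNat := by
  rw [PySem.List.pyRange_one]
  simp only [List.map_map, cyc, Int.sub_zero]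
  refine List.map_congr_left ?_
  intro j _
  simp only [Function.comp_apply, zero_add]
  exact cyIdx_natCast colors hc j

theorem take_eq_cyc (colors : List (List Int)) (k : Nat) (hk : k ≤ colors.length) :
    colors.take k = cyc colors k := by
  apply List.ext_getElem
  · simp [length_cyc, Nat.min_eq_left hk]
  · intro j h1 h2
    have hj : j < k := by simpa [length_cyc] using h2
    have hjL : j < colors.length := lt_of_lt_of_le hj hk
    simp [cyc, Nat.mod_eq_of_lt hjL, List.getElem?_eq_getElem hjL]

theorem cyc_append (colors : List (List Int)) (k : Nat) (hk : colors.length ≤ k) :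
    cyc colors k = colors ++ cyc colors (k - colors.length) := by
  apply List.ext_getElem
  · simp [length_cyc, List.length_append]; omega
  · intro j h1 h2
    by_cases hj : j < colors.length
    · have hm : j % colors.length = j := Nat.mod_eq_of_lt hj
      rw [List.getElem_append_left hj]
      simp [cyc, hm, List.getElem?_eq_getElem hj]
    · have hmod : j % colors.length = (j - colors.length) % colors.length :=
        Nat.mod_eq_sub_mod (by omega)
      rw [List.getElem_append_right (by omega)]
      simp [cyc, hmod]

-- first k elements of m concatenated copies of colors (k ≤ m·len) is cyc
theorem take_flatten_replicate (colors : List (List Int)) (m k : Nat)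
    (hk : k ≤ m * colors.length) :
    ((List.replicate m colors).flatten).take k = cyc colors k := by
  induction m generalizing k with
  | zero =>
    have : k = 0 := by omega
    simp [this, cyc_zero]
  | succ m ih =>
    rw [List.replicate_succ, List.flatten_cons, List.take_append]
    by_cases h : k ≤ colors.length
    · have h2 : k - colors.length = 0 := by omega
      rw [h2]
      simpa using take_eq_cyc colors k h
    · rw [List.take_of_length_le (by omega), ih (k - colors.length) (by
        have hexp : (m + 1) * colors.length = m * colors.length + colors.length := by ring
        omega)]
      rw [cyc_append colors k (by omega)]

-- B's _tile computes cyc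
theorem tileB_eq_cyc (colors : List (List Int)) (hc : colors ≠ []) (k : Int) :
    tileB colors k = cyc colors k.toNat := by
  have hL : 0 < colors.length := List.length_pos_iff.mpr hc
  by_cases hk : k ≤ 0
  · have : k.toNat = 0 := by omega
    simp [tileB, hk, this, cyc_zero]
  · push_neg at hk
    have hLpos : (0 : Int) < (colors.length : Int) := by exact_mod_cast hL
    have hbnd : (-(PySem.Int.floordiv (-k) (colors.length : Int)) - 1) * (colors.length : Int) < k ∧
        k ≤ -(PySem.Int.floordiv (-k) (colors.length : Int)) * (colors.length : Int) :=
      (PySem.Int.neg_floordiv_neg_eq_iff_of_pos hLpos).mp rfl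
    have hkk : k.toNat ≤ (-(PySem.Int.floordiv (-k) (colors.length : Int))).toNat * colors.length := by
      set reps : Int := -(PySem.Int.floordiv (-k) (colors.length : Int)) with hreps
      have hreps0 : 0 < reps := by nlinarith [hbnd.2, hk, hLpos]
      have h2 : ((k.toNat : Int)) ≤ ((reps.toNat : Int)) * (colors.length : Int) := by
        rw [Int.toNat_of_nonneg (le_of_lt hk), Int.toNat_of_nonneg (le_of_lt hreps0)]
        exact hbnd.2
      exact_mod_cast h2
    rw [tileB, if_neg (by omega)]
    show PySem.List.slice
        (PySem.List.pyRepeat colors (-(PySem.Int.floordiv (-k) (colors.length : Int)))) none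
        (some k) = cyc colors k.toNat
    rw [PySem.List.slice_to _ (le_of_lt hk), PySem.List.pyRepeat]
    exact take_flatten_replicate colors _ k.toNat hkk

-- the period unit of alternating/zigzag: element r of colors ++ colors.reverse
theorem unit_getD (colors : List (List Int)) (r : Nat) (hr : r < 2 * colors.length) :
    (colors ++ colors.reverse).getD r [] =
      colors.getD (if r < colors.length then r else 2 * colors.length - 1 - r) [] := by
  have hlen : (colors ++ colors.reverse).length = 2 * colors.length := by simp; omega
  have hrl : r < (colors ++ colors.reverse).length := by omega
  rw [List.getD_eq_getElem _ _ hrl]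
  by_cases h : r < colors.length
  · rw [if_pos h, List.getElem_append_left h, List.getD_eq_getElem _ _ h]
  · have h2 : r - colors.length < colors.reverse.length := by simp; omega
    rw [if_neg h, List.getElem_append_right (by omega), List.getElem_reverse,
      List.getD_eq_getElem _ _ (show 2 * colors.length - 1 - r < colors.length by omega)]
    exact getElem_congr rfl (by omega) (by omega)

-- cyc over the unit, one more element
theorem cyc_unit_succ (colors : List (List Int)) (hc : colors ≠ []) (k : Nat) :
    cyc (colors ++ colors.reverse) (k + 1) =
      cyc (colors ++ colors.reverse) k ++
        [colors.getD (if k % (2 * colors.length) < colors.length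
            then k % (2 * colors.length)
            else 2 * colors.length - 1 - k % (2 * colors.length)) []] := by
  have hL : 0 < colors.length := List.length_pos_iff.mpr hc
  have hlen : (colors ++ colors.reverse).length = 2 * colors.length := by simp; omega
  rw [cyc_succ, hlen, unit_getD colors _ (Nat.mod_lt _ (by omega))]

-- state of A's alternating loop after k appends
def altFwd (L k : Nat) : Bool := decide (k % (2 * L) < L)
def altPos (L k : Nat) : Int :=
  if k % (2 * L) < L then ((k % (2 * L) : Nat) : Int) else ((2 * L - 1 - k % (2 * L) : Nat) : Int)

theorem mod_step {m k r : Nat} (hm : 0 < m) (h : k % m = r) (hr : r + 1 < m) :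
    (k + 1) % m = r + 1 := by
  have hd := Nat.div_add_mod k m
  have he : k + 1 = m * (k / m) + (r + 1) := by omega
  rw [he, Nat.mul_add_mod, Nat.mod_eq_of_lt hr]

theorem mod_wrap {m k : Nat} (hm : 0 < m) (h : k % m = m - 1) : (k + 1) % m = 0 := by
  have hd := Nat.div_add_mod k m
  have he : k + 1 = m * (k / m + 1) := by ring_nf; omega
  rw [he, Nat.mul_mod_right]

theorem altLoop_inv (colors : List (List Int)) (hc : colors ≠ []) (n : Int) :
    ∀ (fuel k : Nat), n ≤ (k : Int) + (fuel : Int) → (k : Int) ≤ n →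
      altLoop colors n fuel (cyc (colors ++ colors.reverse) k)
          (altFwd colors.length k) (altPos colors.length k) =
        cyc (colors ++ colors.reverse) n.toNat := by
  have hL : 0 < colors.length := List.length_pos_iff.mpr hc
  set L := colors.length with hLdef
  intro fuel
  induction fuel with
  | zero =>
    intro k h1 h2
    have : k = n.toNat := by omega
    rw [this, altLoop]
  | succ fuel ih =>
    intro k h1 h2
    rw [altLoop]
    have hlen : (cyc (colors ++ colors.reverse) k).length = k := length_cyc _ _
    by_cases hcond : ((cyc (colors ++ colors.reverse) k).length : Int) < n
    · rw [if_pos hcond]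
      rw [hlen] at hcond
      set r := k % (2 * L) with hr
      have hrlt : r < 2 * L := Nat.mod_lt _ (by omega)
      have happ : cyc (colors ++ colors.reverse) k ++ [cyIdx colors (altPos L k)] =
          cyc (colors ++ colors.reverse) (k + 1) := by
        rw [cyc_unit_succ colors hc k]
        congr 1
        rw [altPos, ← hr]
        by_cases hcase : r < L
        · rw [if_pos hcase, if_pos hcase, cyIdx_natCast colors hc, Nat.mod_eq_of_lt (by omega)]
        · rw [if_neg hcase, if_neg hcase, cyIdx_natCast colors hc, Nat.mod_eq_of_lt (by omega)]
      by_cases hcase : r < L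
      · -- moving forward at index r
        have hfwd : altFwd L k = true := by simp [altFwd, ← hr, hcase]
        have hpos : altPos L k = (r : Int) := by rw [altPos, ← hr, if_pos hcase]
        rw [hpos] at happ
        rw [hfwd, hpos]
        simp only [if_true, happ]
        by_cases hend : r + 1 = L
        · -- bounce at the right end
          have hcnd : (r : Int) + 1 = (L : Int) ∨ (r : Int) + 1 < 0 := by left; exact_mod_cast hend
          rw [if_pos hcnd]
          have hk1 : (k + 1) % (2 * L) = L := by
            have := mod_step (by omega : 0 < 2 * L) hr.symm (by omega : r + 1 < 2 * L)
            omega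
          have hst : max (min ((r : Int) + 1) ((L : Int) - 1)) 0 = altPos L (k + 1) := by
            rw [altPos, hk1, if_neg (by omega)]
            have : 2 * L - 1 - L = L - 1 := by omega
            rw [this]
            have : min ((r : Int) + 1) ((L : Int) - 1) = (L : Int) - 1 := by
              rw [min_eq_right]; omega
            rw [this, max_eq_left (by omega)]
            omega
          have hfw : (!(true : Bool)) = altFwd L (k + 1) := by
            simp [altFwd, hk1] <;> omega
          rw [hst, hfw]
          exact ih (k + 1) (by push_cast; push_cast at h1; omega) (by push_cast; omega)
        · -- keep moving forward
          have hcnd : ¬ ((r : Int) + 1 = (L : Int) ∨ (r : Int) + 1 < 0) := by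
            push_neg
            constructor
            · intro hcontra; exact hend (by exact_mod_cast hcontra)
            · positivity
          rw [if_neg hcnd]
          have hk1 : (k + 1) % (2 * L) = r + 1 :=
            mod_step (by omega) hr.symm (by omega)
          have hfw : (true : Bool) = altFwd L (k + 1) := by simp [altFwd, hk1] <;> omega
          have hps : (r : Int) + 1 = altPos L (k + 1) := by
            rw [altPos, hk1, if_pos (by omega)]; push_cast; ring
          rw [hfw, hps]
          exact ih (k + 1) (by push_cast; push_cast at h1; omega) (by push_cast; omega)
      · -- moving backward at index 2L-1-r
        have hfwd : altFwd L k = false := by simp [altFwd, ← hr, hcase]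
        have hpos : altPos L k = ((2 * L - 1 - r : Nat) : Int) := by
          rw [altPos, ← hr, if_neg hcase]
        rw [hpos] at happ
        rw [hfwd, hpos]
        simp only [Bool.false_eq_true, if_false, happ]
        by_cases hend : r = 2 * L - 1
        · -- bounce at the left end
          have hval : ((2 * L - 1 - r : Nat) : Int) + -1 = -1 := by
            rw [hend]; simp
          have hcnd : ((2 * L - 1 - r : Nat) : Int) + -1 = (L : Int) ∨
              ((2 * L - 1 - r : Nat) : Int) + -1 < 0 := by right; rw [hval]; omega
          rw [if_pos hcnd]
          have hk1 : (k + 1) % (2 * L) = 0 := mod_wrap (by omega) (by omega)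
          have hst : max (min (((2 * L - 1 - r : Nat) : Int) + -1) ((L : Int) - 1)) 0 =
              altPos L (k + 1) := by
            rw [hval, altPos, hk1, if_pos (by omega)]
            rw [min_eq_left (by omega), max_eq_right (by omega)]
            simp
          have hfw : (!(false : Bool)) = altFwd L (k + 1) := by simp [altFwd, hk1] <;> omega
          rw [hst, hfw]
          exact ih (k + 1) (by push_cast; push_cast at h1; omega) (by push_cast; omega)
        · -- keep moving backward
          have hge : L ≤ r := by omega
          have hval : ((2 * L - 1 - r : Nat) : Int) + -1 = ((2 * L - 1 - (r + 1) : Nat) : Int) := by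
            have h2 : r + 1 ≤ 2 * L - 1 := by omega
            push_cast [Nat.cast_sub (by omega : r ≤ 2 * L - 1),
              Nat.cast_sub (by omega : r + 1 ≤ 2 * L - 1)]
            ring
          have hcnd : ¬ (((2 * L - 1 - r : Nat) : Int) + -1 = (L : Int) ∨
              ((2 * L - 1 - r : Nat) : Int) + -1 < 0) := by
            rw [hval]
            push_neg
            constructor
            · intro hcontra
              have : 2 * L - 1 - (r + 1) = L := by exact_mod_cast hcontra
              omega
            · have : 0 ≤ (2 * L - 1 - (r + 1) : Nat) := Nat.zero_le _
              positivity
          rw [if_neg hcnd]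
          have hk1 : (k + 1) % (2 * L) = r + 1 :=
            mod_step (by omega) hr.symm (by omega)
          have hfw : (false : Bool) = altFwd L (k + 1) := by simp [altFwd, hk1] <;> omega
          have hps : ((2 * L - 1 - r : Nat) : Int) + -1 = altPos L (k + 1) := by
            rw [hval, altPos, hk1, if_neg (by omega)]
          rw [hfw, hps]
          exact ih (k + 1) (by push_cast; push_cast at h1; omega) (by push_cast; omega)
    · rw [if_neg hcond]
      rw [hlen] at hcond
      have : k = n.toNat := by omega
      rw [this]

-- zigzag: the loop already holds n beads
theorem zigLoop_stop (colors : List (List Int)) (n : Int) (fuel : Nat)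
    (pat : List (List Int)) (rev : Bool) (h : n ≤ (pat.length : Int)) :
    zigLoop colors n fuel pat rev = pat := by
  cases fuel with
  | zero => rw [zigLoop]
  | succ fuel => rw [zigLoop, if_neg (by omega)]

theorem zigInner_eq (colors : List (List Int)) (hc : colors ≠ []) (n : Int) :
    ∀ (seq : List (List Int)) (k : Nat), (k : Int) ≤ n →
      (∀ (t : Nat), t < seq.length →
        seq[t]? = some ((colors ++ colors.reverse).getD ((k + t) % (2 * colors.length)) [])) →
      zigInner n seq (cyc (colors ++ colors.reverse) k) =
        cyc (colors ++ colors.reverse) (min (k + seq.length) n.toNat) := by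
  intro seq
  induction seq with
  | nil =>
    intro k hk _
    rw [zigInner]
    have : min (k + 0) n.toNat = k := by omega
    rw [List.length_nil, this]
  | cons c rest ih =>
    intro k hk hseq
    rw [zigInner]
    have hlen : (cyc (colors ++ colors.reverse) k).length = k := length_cyc _ _
    by_cases hstop : n ≤ ((cyc (colors ++ colors.reverse) k).length : Int)
    · rw [if_pos hstop]
      rw [hlen] at hstop
      have : min (k + (c :: rest).length) n.toNat = k := by omega
      rw [this]
    · rw [if_neg hstop]
      rw [hlen] at hstop
      have hc0 := hseq 0 (by simp)
      simp only [List.getElem?_cons_zero, Nat.add_zero, Option.some_inj] at hc0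
      have hidx : k % ((colors ++ colors.reverse).length) = k % (2 * colors.length) := by
        rw [List.length_append, List.length_reverse, two_mul]
      have hstep : cyc (colors ++ colors.reverse) k ++ [c] =
          cyc (colors ++ colors.reverse) (k + 1) := by
        rw [cyc_succ, hidx, hc0]
      rw [hstep, ih (k + 1) (by push_cast; push_cast at hstop; omega) ?_]
      · congr 1
        simp only [List.length_cons]
        omega
      · intro t ht
        have h2 := hseq (t + 1) (by simpa using Nat.succ_lt_succ ht)
        simp only [List.getElem?_cons_succ] at h2
        have he : k + (t + 1) = k + 1 + t := by omega
        rw [he] at h2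
        exact h2

theorem zigLoop_inv (colors : List (List Int)) (hc : colors ≠ []) (n : Int) :
    ∀ (fuel j : Nat), ((j * colors.length : Nat) : Int) ≤ n →
      n ≤ ((j * colors.length : Nat) : Int) + (fuel : Int) →
      zigLoop colors n fuel (cyc (colors ++ colors.reverse) (j * colors.length))
          (decide (j % 2 = 1)) =
        cyc (colors ++ colors.reverse) n.toNat := by
  have hL : 0 < colors.length := List.length_pos_iff.mpr hc
  set L := colors.length with hLdef
  intro fuel
  induction fuel with
  | zero =>
    intro j h1 h2
    have : j * L = n.toNat := by omega
    rw [this, zigLoop]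
  | succ fuel ih =>
    intro j h1 h2
    rw [zigLoop]
    have hlen : (cyc (colors ++ colors.reverse) (j * L)).length = j * L := length_cyc _ _
    by_cases hcond : ((cyc (colors ++ colors.reverse) (j * L)).length : Int) < n
    · rw [if_pos hcond]
      rw [hlen] at hcond
      have hseq : ∀ (t : Nat), t < (if decide (j % 2 = 1) = true then colors.reverse else colors).length →
          (if decide (j % 2 = 1) = true then colors.reverse else colors)[t]? =
            some ((colors ++ colors.reverse).getD ((j * L + t) % (2 * L)) []) := by
        intro t ht
        by_cases hj : j % 2 = 1
        · simp only [hj, decide_true, if_true] at ht ⊢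
          have htL : t < L := by simpa using ht
          have hmod : (j * L + t) % (2 * L) = L + t := by
            obtain ⟨m, hm⟩ : ∃ m, j = 2 * m + 1 := ⟨j / 2, by omega⟩
            subst hm
            have he : (2 * m + 1) * L + t = L + t + m * (2 * L) := by ring
            rw [he, Nat.add_mul_mod_self_right, Nat.mod_eq_of_lt (by omega)]
          rw [hmod, unit_getD colors _ (by omega), if_neg (by omega)]
          have h1 : t < colors.reverse.length := by simpa using htL
          rw [List.getElem?_eq_getElem h1, List.getElem_reverse]
          rw [List.getD_eq_getElem _ _ (by omega)]
          exact congrArg some (getElem_congr rfl (by omega) (by omega))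
        · simp only [hj, decide_false, Bool.false_eq_true, if_false] at ht ⊢
          have hmod : (j * L + t) % (2 * L) = t := by
            obtain ⟨m, hm⟩ : ∃ m, j = 2 * m := ⟨j / 2, by omega⟩
            subst hm
            have he : 2 * m * L + t = t + m * (2 * L) := by ring
            rw [he, Nat.add_mul_mod_self_right, Nat.mod_eq_of_lt (by omega)]
          rw [hmod, unit_getD colors _ (by omega), if_pos ht]
          rw [List.getElem?_eq_getElem ht, List.getD_eq_getElem _ _ ht]
      rw [zigInner_eq colors hc n _ (j * L) (le_of_lt hcond) hseq]
      have hseqlen : (if decide (j % 2 = 1) = true then colors.reverse else colors).length = L := by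
        by_cases hj : j % 2 = 1 <;> simp [hj, hLdef]
      rw [hseqlen]
      have hexp : (j + 1) * L = j * L + L := by ring
      by_cases hfull : (j + 1) * L ≤ n.toNat
      · have hmin : min (j * L + L) n.toNat = (j + 1) * L := by omega
        rw [hmin]
        have hbool : (!decide (j % 2 = 1)) = decide ((j + 1) % 2 = 1) := by
          by_cases hj : j % 2 = 1
          · simp [hj, Nat.add_mod, (by omega : ¬ ((j + 1) % 2 = 1))]
          · simp [hj, (by omega : (j + 1) % 2 = 1)]
        rw [hbool]
        exact ih (j + 1) (by omega) (by omega)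

      · have hmin : min (j * L + L) n.toNat = n.toNat := by omega
        rw [hmin]
        apply zigLoop_stop
        rw [length_cyc]
        omega
    · rw [if_neg hcond]
      rw [hlen] at hcond
      have : j * L = n.toNat := by omega
      rw [this]

-- A's burst-mode insert of the center bead equals concatenation
theorem insert_mid (l1 l2 : List (List Int)) (x : List Int) :
    PySem.List.insert (l1 ++ l2) ((l1.length : Nat) : Int) x = l1 ++ x :: l2 := by
  simp only [PySem.List.insert, PySem.List.sliceIndices]
  norm_num
  rw [if_neg (by omega : ¬ ((l1.length : Int) : Int) < 0)]
  simp [List.take_left, List.drop_left]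

theorem insert_neg_nil (i : Int) (x : List Int) (h : i < 0) :
    PySem.List.insert ([] : List (List Int)) i x = [x] := by
  simp only [PySem.List.insert, PySem.List.sliceIndices]
  simp [h]

-- per-mode equalities, nonempty palette
theorem sym_eq (colors : List (List Int)) (hc : colors ≠ []) (n : Int) :
    (let half := PySem.Int.floordiv n 2
     let pattern := (PySem.List.pyRange 0 half 1).map (fun i => cyIdx colors i)
     pattern ++ pattern.reverse) =
      (let half := tileB colors (PySem.Int.floordiv n 2)
       half ++ half.reverse) := by
  simp only
  rw [map_range_cyIdx colors hc, tileB_eq_cyc colors hc]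

theorem grad_eq (colors : List (List Int)) (hc : colors ≠ []) (n : Int) :
    (PySem.List.pyRange 0 n 1).map (fun i => cyIdx colors i) = tileB colors n := by
  rw [map_range_cyIdx colors hc, tileB_eq_cyc colors hc]

theorem alt_eq (colors : List (List Int)) (hc : colors ≠ []) (n : Int) :
    altLoop colors n n.toNat [] true 0 = tileB (colors ++ colors.reverse) n := by
  have hL : 0 < colors.length := List.length_pos_iff.mpr hc
  have hcu : colors ++ colors.reverse ≠ [] := by simp [hc]
  rw [tileB_eq_cyc _ hcu]
  by_cases hn : n ≤ 0
  · have : n.toNat = 0 := by omega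
    rw [this, altLoop, cyc_zero]
  · push_neg at hn
    have h0 : cyc (colors ++ colors.reverse) 0 = [] := cyc_zero _
    have hf : altFwd colors.length 0 = true := by simp [altFwd]; omega
    have hp : altPos colors.length 0 = 0 := by
      rw [altPos, if_pos (by simpa using hL)]; simp
    rw [← h0, ← hf, ← hp]
    exact altLoop_inv colors hc n n.toNat 0 (by omega) (by omega)

theorem zig_eq (colors : List (List Int)) (hc : colors ≠ []) (n : Int) :
    zigLoop colors n n.toNat [] false = tileB (colors ++ colors.reverse) n := by
  have hcu : colors ++ colors.reverse ≠ [] := by simp [hc]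
  rw [tileB_eq_cyc _ hcu]
  by_cases hn : n ≤ 0
  · have : n.toNat = 0 := by omega
    rw [this, zigLoop, cyc_zero]
  · push_neg at hn
    have h0 : cyc (colors ++ colors.reverse) (0 * colors.length) = [] := by
      rw [Nat.zero_mul]
      rfl
    have hb : decide ((0 : Nat) % 2 = 1) = false := by decide
    rw [← h0, ← hb]
    exact zigLoop_inv colors hc n n.toNat 0 (by simpa using le_of_lt hn) (by simp)

theorem burst_eq (colors : List (List Int)) (hc : colors ≠ []) (n : Int) :
    (let half := PySem.Int.floordiv n 2
     let half_pattern := (PySem.List.pyRange 0 half 1).map (fun i => cyIdx colors i)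
     let pattern := half_pattern.reverse ++ half_pattern
     if PySem.Int.mod n 2 ≠ 0 then PySem.List.insert pattern half (cyIdx colors half)
     else pattern) =
      (let h := PySem.Int.floordiv n 2
       let half := tileB colors h
       if PySem.Int.mod n 2 ≠ 0 then half.reverse ++ [cyIdx colors h] ++ half
       else half.reverse ++ half) := by
  simp only
  rw [map_range_cyIdx colors hc, tileB_eq_cyc colors hc]
  set h := PySem.Int.floordiv n 2 with hh
  set half := cyc colors h.toNat with hhalf
  by_cases hodd : PySem.Int.mod n 2 ≠ 0
  · rw [if_pos hodd, if_pos hodd]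
    by_cases hneg : h < 0
    · have ht : h.toNat = 0 := by omega
      rw [ht] at hhalf
      rw [hhalf, cyc_zero]
      simpa using insert_neg_nil h (cyIdx colors h) hneg
    · push_neg at hneg
      have hlen : half.reverse.length = h.toNat := by rw [List.length_reverse, hhalf, length_cyc]
      have hcast : ((half.reverse.length : Nat) : Int) = h := by
        rw [hlen]; omega
      rw [← hcast, insert_mid]
      simp
  · rw [if_neg hodd, if_neg hodd]

-- empty palette, n small enough that the Python never indexes: everything is []
theorem tileB_nonpos (colors : List (List Int)) (k : Int) (hk : k ≤ 0) : tileB colors k = [] := by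
  rw [tileB, if_pos hk]

theorem pyRange_map_nil (f : Int → List Int) (h : Int) (hh : h ≤ 0) :
    (PySem.List.pyRange 0 h 1).map f = [] := by
  rw [PySem.List.pyRange_one_eq_nil (by omega)]
  rfl

-- ===== VERDICT (by name: the statement is the Claim_ definition above) =====
theorem generate_linear_pattern_spec : Claim_equal_generate_linear_pattern := by
  intro palette n mode _ hpre
  unfold Spec_generate_linear_pattern generate_linear_pattern generate_linear_pattern_alt
  simp only
  by_cases hne : palette ≠ []
  · -- nonempty palette: the per-mode lemmas
    by_cases h1 : mode = "symmetric"
    · rw [if_pos h1, if_pos h1]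
      exact sym_eq palette hne n
    rw [if_neg h1, if_neg h1]
    by_cases h2 : mode = "alternating"
    · rw [if_pos h2, if_pos (Or.inl h2)]
      exact alt_eq palette hne n
    rw [if_neg h2]
    by_cases h3 : mode = "gradient"
    · have hz : ¬ (mode = "alternating" ∨ mode = "zigzag") := by
        rintro (h | h) <;> simp_all
      rw [if_pos h3, if_neg hz, if_pos h3]
      exact grad_eq palette hne n
    rw [if_neg h3]
    by_cases h4 : mode = "zigzag"
    · rw [if_pos h4, if_pos (Or.inr h4)]
      exact zig_eq palette hne n
    rw [if_neg h4]
    have hz : ¬ (mode = "alternating" ∨ mode = "zigzag") := by rintro (h | h) <;> simp_all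
    rw [if_neg hz]
    by_cases h5 : mode = "burst"
    · rw [if_pos h5, if_neg h3, if_pos h5]
      exact burst_eq palette hne n
    rw [if_neg h5, if_neg h3, if_neg h5]
  · -- empty palette: Pre_ forces every reached branch to produce []
    push_neg at hne
    subst hne
    rcases hpre with hpre | hpre
    · exact absurd rfl hpre
    by_cases h1 : mode = "symmetric"
    · rw [if_pos h1, if_pos h1]
      rw [if_pos h1] at hpre
      have hhalf : PySem.Int.floordiv n 2 ≤ 0 := by
        rw [PySem.Int.floordiv_eq_ediv_of_pos (by omega)]; omega
      rw [pyRange_map_nil _ _ hhalf, tileB_nonpos _ _ hhalf]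
    rw [if_neg h1, if_neg h1]
    rw [if_neg h1] at hpre
    by_cases h2 : mode = "alternating"
    · rw [if_pos h2, if_pos (Or.inl h2)]
      rw [if_pos (Or.inl h2)] at hpre
      have : n.toNat = 0 := by omega
      rw [this, altLoop, tileB_nonpos _ _ (by omega)]
    rw [if_neg h2]
    by_cases h3 : mode = "gradient"
    · have hz : ¬ (mode = "alternating" ∨ mode = "zigzag") := by
        rintro (h | h) <;> simp_all
      rw [if_pos h3, if_neg hz, if_pos h3]
      rw [if_pos (Or.inr (Or.inl h3))] at hpre
      rw [pyRange_map_nil _ _ (by omega), tileB_nonpos _ _ (by omega)]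
    rw [if_neg h3]
    by_cases h4 : mode = "zigzag"
    · rw [if_pos h4, if_pos (Or.inr h4)]
      rw [if_pos (Or.inr (Or.inr h4))] at hpre
      have : n.toNat = 0 := by omega
      rw [this, zigLoop, tileB_nonpos _ _ (by omega)]
    rw [if_neg h4]
    have hz : ¬ (mode = "alternating" ∨ mode = "zigzag") := by rintro (h | h) <;> simp_all
    rw [if_neg hz]
    have hz2 : ¬ (mode = "alternating" ∨ mode = "gradient" ∨ mode = "zigzag") := by
      rintro (h | h | h) <;> simp_all
    rw [if_neg hz2] at hpre
    by_cases h5 : mode = "burst"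
    · rw [if_pos h5, if_neg h3, if_pos h5]
      rw [if_pos h5] at hpre
      obtain ⟨hn0, heven⟩ := hpre
      have hhalf : PySem.Int.floordiv n 2 ≤ 0 := by
        rw [PySem.Int.floordiv_eq_ediv_of_pos (by omega)]; omega
      rw [if_neg (by simpa using heven), if_neg (by simpa using heven)]
      rw [pyRange_map_nil _ _ hhalf, tileB_nonpos _ _ hhalf]
    rw [if_neg h5, if_neg h3, if_neg h5]
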